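-- pv_equiv track=rewrite | github.com/dfedukov/misis-dfedukov-sys-analysis | task1/task1.py | def_2
-- ===== SOURCE A (Python) =====
-- def def_2(edges, e: int):
--     vs = set()
--     for a, b in edges:
--         vs.add(a)
--         vs.add(b)
--     vs.add(int(e))
--     vs = sorted(vs)
--     ix = {v: i for i, v in enumerate(vs)}
--     return vs, ix
-- ===== SOURCE B (Python) =====
-- def def_2(edges, e: int):
--     pool = []
--     for a, b in edges:
--         pool.append(a)
--         pool.append(b)
--     pool.append(int(e))
--     pool.sort()
--     vs = []
--     ix = {}
--     for v in pool:
--         if not vs or v != vs[-1]: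
--             ix[v] = len(vs)
--             vs.append(v)
--     return vs, ix
-- ===== Notes on version B (the rewrite author's own statement) =====
-- stated objective: alternative
-- what changed: Replaces set-based deduplication followed by sorting and an enumerate dict-comprehension with one sort of the raw endpoint list and a single linear pass that skips adjacent duplicates while recording indices.
import Mathlib
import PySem

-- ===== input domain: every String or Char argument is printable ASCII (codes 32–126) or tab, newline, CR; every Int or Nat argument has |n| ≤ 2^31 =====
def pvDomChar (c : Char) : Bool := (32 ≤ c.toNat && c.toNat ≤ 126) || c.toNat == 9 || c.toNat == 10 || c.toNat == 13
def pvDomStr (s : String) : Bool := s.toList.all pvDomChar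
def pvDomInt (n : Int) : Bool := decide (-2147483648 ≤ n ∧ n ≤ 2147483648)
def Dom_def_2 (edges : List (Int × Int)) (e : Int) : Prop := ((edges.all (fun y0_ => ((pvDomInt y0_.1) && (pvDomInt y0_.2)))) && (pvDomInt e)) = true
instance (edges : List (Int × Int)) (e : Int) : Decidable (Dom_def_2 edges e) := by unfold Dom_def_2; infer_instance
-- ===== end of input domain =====

-- B replaces set-dedup-then-sort with sort-then-adjacent-duplicate-skip in one indexed pass (alternative decomposition, same cost).

-- ===== PORT A =====
def def_2 (edges : List (Int × Int)) (e : Int) : List Int × (List (Int × Int)) :=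
  let vs : PySem.Set Int :=
    edges.foldl (fun s p => PySem.Set.add (PySem.Set.add s p.1) p.2) PySem.Set.empty
  let vs := PySem.Set.add vs e          -- vs.add(int(e)); int(e) = e on an Int
  let vsSorted := PySem.List.sorted vs (fun v => v) false
  let ix : PySem.Dict Int Int :=
    (PySem.List.enumerate vsSorted 0).foldl (fun d p => d.insert p.2 p.1) PySem.Dict.empty
  (vsSorted, ix.items)

-- ===== PORT B =====
def def_2_alt (edges : List (Int × Int)) (e : Int) : List Int × (List (Int × Int)) :=
  let pool := edges.foldl (fun acc p => acc ++ [p.1, p.2]) []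
  let pool := pool ++ [e]               -- pool.append(int(e))
  let pool := PySem.List.sorted pool (fun v => v) false
  let res := pool.foldl
    (fun (st : List Int × PySem.Dict Int Int) v =>
      if st.1 = [] ∨ v ≠ PySem.List.pyGetD st.1 (-1) 0 then
        (st.1 ++ [v], st.2.insert v (st.1.length : Int))
      else st)
    ([], PySem.Dict.empty)
  (res.1, res.2.items)

-- ===== PRECONDITION & SPEC =====
def Spec_def_2 (edges : List (Int × Int)) (e : Int) (out : List Int × (List (Int × Int))) : Prop := out = def_2_alt edges e
instance (edges : List (Int × Int)) (e : Int) (out : List Int × (List (Int × Int))) : Decidable (Spec_def_2 edges e out) := by unfold Spec_def_2; infer_instance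

-- ===== CLAIM (what is proved, stated in full; the proofs are below) =====
def Claim_equal_def_2 : Prop := ∀ (edges : List (Int × Int)) (e : Int), Dom_def_2 edges e → Spec_def_2 edges e (def_2 edges e)

-- ===== LEMMAS AND PROOFS =====

-- index pairs {v: i} of a duplicate-free list, in order
def pairsOf (vs : List Int) : List (Int × Int) :=
  (PySem.List.enumerate vs 0).map (fun p => (p.2, p.1))

-- adjacent-duplicate skip with the previously kept element as state
def dedupAfter : Option Int → List Int → List Int
  | _, [] => []
  | prev, v :: t => if prev = some v then dedupAfter prev t else v :: dedupAfter (some v) t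

theorem enumerate_append_singleton (xs : List Int) (x : Int) (s : Int) :
    PySem.List.enumerate (xs ++ [x]) s = PySem.List.enumerate xs s ++ [(s + xs.length, x)] := by
  induction xs generalizing s with
  | nil => simp [PySem.List.enumerate_cons, PySem.List.enumerate_nil]
  | cons y t ih =>
      simp [PySem.List.enumerate_cons, ih (s + 1)]
      ring_nf

theorem pairsOf_append_singleton (vs : List Int) (v : Int) :
    pairsOf (vs ++ [v]) = pairsOf vs ++ [(v, (vs.length : Int))] := by
  simp [pairsOf, enumerate_append_singleton]

theorem fst_pairsOf (vs : List Int) : (pairsOf vs).map (·.1) = vs := by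
  simp only [pairsOf, List.map_map]
  have h2 : ((fun x : Int × Int => x.1) ∘ fun p : Int × Int => (p.2, p.1))
      = (fun p : Int × Int => p.2) := rfl
  rw [h2]
  exact PySem.List.map_snd_enumerate vs 0

theorem mem_of_mem_dedupAfter (prev : Option Int) (pool : List Int) :
    ∀ x ∈ dedupAfter prev pool, x ∈ pool := by
  induction pool generalizing prev with
  | nil => simp [dedupAfter]
  | cons v t ih =>
      intro x hx
      by_cases h : prev = some v
      · rw [show dedupAfter prev (v :: t) = dedupAfter prev t from by
          simp [dedupAfter, h]] at hx
        exact List.mem_cons_of_mem _ (ih prev x hx)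
      · rw [show dedupAfter prev (v :: t) = v :: dedupAfter (some v) t from by
          simp [dedupAfter, h]] at hx
        rcases List.mem_cons.mp hx with h1 | h2
        · exact h1 ▸ List.mem_cons_self
        · exact List.mem_cons_of_mem _ (ih (some v) x h2)

theorem mem_dedupAfter_of_mem (prev : Option Int) (pool : List Int) :
    ∀ x ∈ pool, x ∈ dedupAfter prev pool ∨ prev = some x := by
  induction pool generalizing prev with
  | nil => simp
  | cons v t ih =>
      intro x hx
      by_cases h : prev = some v
      · rw [show dedupAfter prev (v :: t) = dedupAfter prev t from by simp [dedupAfter, h]]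
        rcases List.mem_cons.mp hx with rfl | hxt
        · exact Or.inr h
        · exact ih prev x hxt
      · rw [show dedupAfter prev (v :: t) = v :: dedupAfter (some v) t from by
          simp [dedupAfter, h]]
        rcases List.mem_cons.mp hx with rfl | hxt
        · exact Or.inl List.mem_cons_self
        · rcases ih (some v) x hxt with h1 | h2
          · exact Or.inl (List.mem_cons_of_mem _ h1)
          · refine Or.inl ?_
            have : v = x := by injection h2
            simp [this]

theorem dedupAfter_sorted_some (p : Int) (pool : List Int)
    (hs : pool.Pairwise (· ≤ ·)) (hge : ∀ x ∈ pool, p ≤ x) :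
    (dedupAfter (some p) pool).Pairwise (· < ·) ∧ ∀ y ∈ dedupAfter (some p) pool, p < y := by
  induction pool generalizing p with
  | nil => exact ⟨List.Pairwise.nil, by simp [dedupAfter]⟩
  | cons v t ih =>
      have hst := (List.pairwise_cons.mp hs).2
      have hvt := (List.pairwise_cons.mp hs).1
      by_cases h : p = v
      · rw [show dedupAfter (some p) (v :: t) = dedupAfter (some p) t from by
          simp [dedupAfter, h]]
        exact ih p hst (fun x hx => h ▸ hvt x hx)
      · have hpv : p < v := lt_of_le_of_ne (hge v List.mem_cons_self) h
        rw [show dedupAfter (some p) (v :: t) = v :: dedupAfter (some v) t from by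
          simp [dedupAfter, h]]
        have hrec := ih v hst hvt
        constructor
        · exact List.pairwise_cons.mpr ⟨fun y hy => hrec.2 y hy, hrec.1⟩
        · intro y hy
          rcases List.mem_cons.mp hy with rfl | hyt
          · exact hpv
          · exact lt_trans hpv (hrec.2 y hyt)

theorem dedupAfter_sorted_none (pool : List Int) (hs : pool.Pairwise (· ≤ ·)) :
    (dedupAfter none pool).Pairwise (· < ·) := by
  cases pool with
  | nil => exact List.Pairwise.nil
  | cons v t =>
      rw [show dedupAfter none (v :: t) = v :: dedupAfter (some v) t from by
        simp [dedupAfter]]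
      have hst := (List.pairwise_cons.mp hs).2
      have hvt := (List.pairwise_cons.mp hs).1
      have hrec := dedupAfter_sorted_some v t hst hvt
      exact List.pairwise_cons.mpr ⟨fun y hy => hrec.2 y hy, hrec.1⟩

theorem mem_dedupAfter_none (pool : List Int) (x : Int) :
    x ∈ dedupAfter none pool ↔ x ∈ pool := by
  constructor
  · exact mem_of_mem_dedupAfter none pool x
  · intro hx
    rcases mem_dedupAfter_of_mem none pool x hx with h | h
    · exact h
    · exact absurd h (by simp)

-- the B-side fold computes the adjacent-dedup list together with its index pairs
theorem foldB_spec (pool : List Int) :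
    ∀ (vs : List Int) (d : PySem.Dict Int Int),
      d.items = pairsOf vs →
      (vs ++ dedupAfter vs.getLast? pool).Nodup →
      pool.foldl
        (fun (st : List Int × PySem.Dict Int Int) v =>
          if st.1 = [] ∨ v ≠ PySem.List.pyGetD st.1 (-1) 0 then
            (st.1 ++ [v], st.2.insert v (st.1.length : Int))
          else st)
        (vs, d)
      = (vs ++ dedupAfter vs.getLast? pool,
         PySem.Dict.mk (pairsOf (vs ++ dedupAfter vs.getLast? pool))) := by
  induction pool with
  | nil =>
      intro vs d hd _
      simp only [dedupAfter, List.append_nil, List.foldl_nil]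
      congr 1
      exact (PySem.Dict.ext hd).symm ▸ rfl
  | cons v t ih =>
      intro vs d hd hnod
      have hkeys : d.keys = vs := by
        simpa [PySem.Dict.keys, hd] using fst_pairsOf vs
      by_cases hC : vs = [] ∨ v ≠ PySem.List.pyGetD vs (-1) 0
      · -- kept element
        have hprev : vs.getLast? ≠ some v := by
          rcases hC with h | h
          · simp [h]
          · cases hvs : vs with
            | nil => simp
            | cons a l =>
                have hne : vs ≠ [] := by simp [hvs]
                rw [← hvs]
                rw [PySem.List.pyGetD_neg_one vs 0 hne] at h
                rw [List.getLast?_eq_some_getLast hne]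
                intro hc
                exact h (by injection hc with hc'; exact hc'.symm)
        have hded : dedupAfter vs.getLast? (v :: t) = v :: dedupAfter (some v) t := by
          simp only [dedupAfter, if_neg hprev]
        rw [hded] at hnod ⊢
        have hvnotin : v ∉ vs := by
          intro hv
          exact List.disjoint_of_nodup_append hnod hv List.mem_cons_self
        have hcont : d.contains v = false := by
          cases h2 : d.contains v
          · rfl
          · exact absurd (hkeys ▸ (PySem.Dict.contains_iff_mem_keys d v).mp h2) hvnotin
        have hitems : (d.insert v (vs.length : Int)).items = pairsOf (vs ++ [v]) := by
          rw [PySem.Dict.items_insert_of_not_contains d (vs.length : Int) hcont, hd,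
            pairsOf_append_singleton]
        simp only [List.foldl_cons]
        rw [if_pos hC]
        have hlast : (vs ++ [v]).getLast? = some v := by simp
        have hnod' : ((vs ++ [v]) ++ dedupAfter (vs ++ [v]).getLast? t).Nodup := by
          rw [hlast]; simpa [List.append_assoc] using hnod
        have hstep := ih (vs ++ [v]) (d.insert v (vs.length : Int)) hitems hnod'
        rw [hstep, hlast]
        simp [List.append_assoc]
      · -- skipped element: vs ≠ [] and v = vs[-1]
        push Not at hC
        obtain ⟨hne, hvlast⟩ := hC
        have hprev : vs.getLast? = some v := by
          rw [List.getLast?_eq_some_getLast hne]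
          rw [PySem.List.pyGetD_neg_one vs 0 hne] at hvlast
          exact congrArg some hvlast.symm
        have hded : dedupAfter vs.getLast? (v :: t) = dedupAfter vs.getLast? t := by
          simp [dedupAfter, hprev]
        rw [hded] at hnod ⊢
        simp only [List.foldl_cons]
        rw [if_neg (by push Not; exact ⟨hne, hvlast⟩)]
        exact ih vs d hd hnod

-- A's set-building loop over edges is a fold of Set.add over the flattened endpoints
theorem setFold (edges : List (Int × Int)) (s0 : PySem.Set Int) :
    edges.foldl (fun s p => PySem.Set.add (PySem.Set.add s p.1) p.2) s0
      = (edges.flatMap (fun p => [p.1, p.2])).foldl PySem.Set.add s0 := by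
  induction edges generalizing s0 with
  | nil => rfl
  | cons p t ih => simp [List.flatMap_cons, ih]

-- ===== VERDICT (by name: the statement is the Claim_ definition above) =====
theorem def_2_spec : Claim_equal_def_2 := by
  unfold Claim_equal_def_2
  intro edges e _
  unfold Spec_def_2 def_2 def_2_alt
  simp only []
  -- the common multiset of vertices and its sorted form
  set L : List Int := edges.flatMap (fun p => [p.1, p.2]) ++ [e] with hL
  set pool : List Int := PySem.List.sorted L (fun v => v) false with hpool
  -- B's raw endpoint list is L
  have hB_pool : edges.foldl (fun acc p => acc ++ [p.1, p.2]) [] ++ [e] = L := by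
    rw [PySem.List.foldl_append_eq_flatMap (fun p => [p.1, p.2]) edges []]
    simp [hL]
  -- A's set is set(L)
  have hA_set :
      PySem.Set.add
        (edges.foldl (fun s p => PySem.Set.add (PySem.Set.add s p.1) p.2) PySem.Set.empty) e
      = PySem.Set.ofList L := by
    rw [setFold edges PySem.Set.empty, PySem.Set.ofList_eq_foldl, hL, List.foldl_append]
    rfl
  have hsorted : pool.Pairwise (· ≤ ·) := PySem.List.sorted_pairwise L (fun v => v)
  have hDlt : (dedupAfter none pool).Pairwise (· < ·) := dedupAfter_sorted_none pool hsorted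
  have hDnodup : (dedupAfter none pool).Nodup := hDlt.imp (fun h => ne_of_lt h)
  -- sorted(set(L)) is exactly the adjacent-dedup of sorted(L)
  have hD : PySem.List.sorted (PySem.Set.ofList L) (fun v => v) false = dedupAfter none pool := by
    apply PySem.List.sorted_eq_of_perm_of_pairwise_lt
    · refine (List.perm_ext_iff_of_nodup hDnodup (PySem.Set.nodup_ofList L)).mpr ?_
      intro x
      rw [mem_dedupAfter_none pool x, PySem.Set.mem_ofList L x, hpool,
        PySem.List.mem_sorted L (fun v => v) false x]
    · exact hDlt
  -- B's fold
  have hfold := foldB_spec pool [] PySem.Dict.empty rfl (by simpa using hDnodup)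
  simp only [List.getLast?_nil, List.nil_append] at hfold
  rw [hB_pool, ← hpool, hfold, hA_set, hD]
  -- A's dict over the enumerate of the (duplicate-free) sorted list appends fresh keys
  have hix :
      ((PySem.List.enumerate (dedupAfter none pool) 0).foldl
        (fun d p => d.insert p.2 p.1) PySem.Dict.empty).items
      = pairsOf (dedupAfter none pool) := by
    rw [PySem.Dict.items_foldl_insert_fresh (PySem.List.enumerate (dedupAfter none pool) 0)
      (fun p => p.2) (fun p => p.1) PySem.Dict.empty
      (fun a _ => PySem.Dict.contains_empty a.2)
      (by rw [PySem.List.map_snd_enumerate]; exact hDnodup)]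
    rfl
  rw [hix]
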